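-- pv_equiv track=rewrite | github.com/wisdom08/algo | 1816-truncate-sentence/1816-truncate-sentence.py | truncateSentence
-- ===== SOURCE A (Python) =====
-- def truncateSentence(s: str, k: int) -> str:
--     s = s.split(" ")
--     res = []
--     for i in range(len(s)):
--         if i == k:
--             break
--         else:
--             res.append(s[i])
--
--     return ' '.join(res)
-- ===== SOURCE B (Python) =====
-- def truncateSentence(s: str, k: int) -> str:
--     # Scan for the k-th space with str.find; no word list is built.
--     if k == 0:
--         return ""
--     idx = -1
--     for _ in range(k):
--         idx = s.find(" ", idx + 1)
--         if idx == -1: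
--             return s
--     return s[:idx]
-- ===== Notes on version B (the rewrite author's own statement) =====
-- stated objective: simpler
-- what changed: B never builds a word list: it locates the k-th space by repeated str.find and returns the prefix before it (s unchanged if there are fewer than k spaces, '' for k==0), instead of A's split-into-list, bounded append loop and join.
-- outside the precondition, e.g. on truncateSentence('a b', -1): A returns 'a b', B returns 'a '
import Mathlib
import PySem

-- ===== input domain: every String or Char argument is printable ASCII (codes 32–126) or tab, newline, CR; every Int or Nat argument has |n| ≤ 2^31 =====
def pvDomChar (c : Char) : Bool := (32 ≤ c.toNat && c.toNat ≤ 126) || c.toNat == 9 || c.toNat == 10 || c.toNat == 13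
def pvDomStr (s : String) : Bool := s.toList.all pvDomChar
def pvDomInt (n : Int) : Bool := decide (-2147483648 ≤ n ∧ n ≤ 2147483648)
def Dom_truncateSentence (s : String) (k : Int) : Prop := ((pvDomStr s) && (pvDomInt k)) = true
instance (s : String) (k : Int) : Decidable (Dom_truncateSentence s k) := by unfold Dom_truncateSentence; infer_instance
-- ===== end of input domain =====

-- B keeps the first k space-separated fields by scanning for the k-th space with find,
-- instead of A's split-into-list / bounded-append loop / join. Objective: simpler.

-- ===== PORT A =====
-- A's 'for i in range(len(s)): if i == k: break else: res.append(s[i])' loop,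
-- as structural recursion over the word list with the index i carried along
def aLoop (k : Int) : Int → List (List Char) → List (List Char) → List (List Char)
  | _, res, [] => res
  | i, res, w :: ws => if i = k then res else aLoop k (i + 1) (res ++ [w]) ws

def truncateSentence (s : String) (k : Int) : String :=
  let sp := PySem.Chars.splitOn s.toList " ".toList               -- s = s.split(" ")
  String.ofList (PySem.Chars.join " ".toList (aLoop k 0 [] sp))   -- ' '.join(res)

-- ===== PORT B =====
-- B's 'for _ in range(k): idx = s.find(" ", idx + 1); if idx == -1: return s' loop,
-- as recursion on the remaining iteration count; when it ends, returns s[:idx]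
def bLoop (s : String) : Nat → Int → String
  | 0, idx => PySem.Str.slice s none (some idx)
  | n + 1, idx =>
      let j := PySem.Str.findFrom s " " (idx + 1)
      if j = -1 then s else bLoop s n j

def truncateSentence_alt (s : String) (k : Int) : String :=
  if k = 0 then "" else bLoop s k.toNat (-1)

-- ===== PRECONDITION & SPEC =====
-- Pre_ restricts to the task's natural domain: k is a count of words to keep, so
-- negative k is excluded (there A returns the whole string, B its natural value).
def Pre_truncateSentence (s : String) (k : Int) : Prop := 0 ≤ k
instance (s : String) (k : Int) : Decidable (Pre_truncateSentence s k) := by unfold Pre_truncateSentence; infer_instance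
def pvWitness_truncateSentence : String × Int := ("hello world and more", 2)

def Spec_truncateSentence (s : String) (k : Int) (out : String) : Prop := out = truncateSentence_alt s k
instance (s : String) (k : Int) (out : String) : Decidable (Spec_truncateSentence s k out) := by unfold Spec_truncateSentence; infer_instance

-- ===== CLAIM (what is proved, stated in full; the proofs are below) =====
def Claim_equal_truncateSentence : Prop := ∀ (s : String) (k : Int), Dom_truncateSentence s k → Pre_truncateSentence s k → Spec_truncateSentence s k (truncateSentence s k)

-- ===== LEMMAS AND PROOFS =====

-- structural model of Python's str.split(" "): pre accumulates the current field
def mysplit (pre : List Char) : List Char → List (List Char)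
  | [] => [pre]
  | c :: rest => if c = ' ' then pre :: mysplit [] rest else mysplit (pre ++ [c]) rest

-- the common value both loops compute: the first n+1 space-separated fields of suf,
-- space-joined (all of suf if it holds fewer than n+1 spaces)
def F : Nat → List Char → List Char
  | n, suf =>
      let j := PySem.Chars.find suf [' ']
      if j = -1 then suf
      else match n with
        | 0 => suf.take j.toNat
        | n + 1 => suf.take (j.toNat + 1) ++ F n (suf.drop (j.toNat + 1))

theorem go_spec : ∀ (fuel : Nat) (l cur : List Char) (acc : List (List Char)),
    l.length ≤ fuel →
    PySem.Chars.splitOn.go [' '] fuel l cur acc = acc.reverse ++ mysplit cur.reverse l := by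
  intro fuel
  induction fuel with
  | zero =>
    intro l cur acc h
    have : l = [] := by simpa using List.length_eq_zero_iff.mp (Nat.le_zero.mp h)
    subst this
    rw [PySem.Chars.splitOn.go.eq_def]
    simp [mysplit]
  | succ f ih =>
    intro l cur acc h
    cases l with
    | nil => rw [PySem.Chars.splitOn.go.eq_def]; simp [mysplit]
    | cons c rest =>
      rw [PySem.Chars.splitOn.go.eq_def]
      simp only [List.length_cons] at *
      by_cases hc : c = ' '
      · subst hc
        rw [if_pos (by simp [List.isPrefixOf])]
        rw [ih _ _ _ (by simpa using Nat.le_of_succ_le_succ h)]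
        simp [mysplit]
      · rw [if_neg (by simp [List.isPrefixOf]; exact fun hh => hc hh.symm)]
        rw [ih _ _ _ (by omega)]
        simp [mysplit, hc]

theorem splitOn_eq_mysplit (cs : List Char) :
    PySem.Chars.splitOn cs [' '] = mysplit [] cs := by
  rw [PySem.Chars.splitOn]
  rw [go_spec _ _ _ _ (by omega)]
  simp

theorem singleton_prefix_drop (c : Char) (l : List Char) (i : Nat) :
    ([c] <+: l.drop i) ↔ l[i]? = some c := by
  cases h : l.drop i with
  | nil =>
    have : l.length ≤ i := by
      have := congrArg List.length h; simp at this; omega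
    simp [List.getElem?_eq_none this]
  | cons x xs =>
    have hx : l[i]? = some x := by
      have := congrArg (fun t => t[0]?) h
      simpa [List.getElem?_drop] using this
    simp [List.cons_prefix_iff, hx]

theorem find_char_eq (s : List Char) (c : Char) (j : Nat)
    (h1 : s[j]? = some c) (h2 : ∀ i, i < j → s[i]? ≠ some c) :
    PySem.Chars.find s [c] = (j : Int) := by
  have hinf : [c] <:+: s := by
    rw [← PySem.Chars.isIn_iff_infix, ← PySem.Chars.exists_prefix_drop_iff_isIn]
    exact ⟨j, (singleton_prefix_drop c s j).mpr h1⟩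
  have hnn : 0 ≤ PySem.Chars.find s [c] := (PySem.Chars.find_nonneg_iff s [c]).mpr hinf
  obtain ⟨hp, hmin⟩ := PySem.Chars.find_spec hnn
  have ht := (singleton_prefix_drop c s _).mp hp
  rcases Nat.lt_trichotomy (PySem.Chars.find s [c]).toNat j with h | h | h
  · exact absurd ht (h2 _ h)
  · omega
  · exact ((hmin j h) ((singleton_prefix_drop c s j).mpr h1)).elim

theorem find_char_neg (s : List Char) (c : Char) (h : c ∉ s) :
    PySem.Chars.find s [c] = -1 := by
  rw [PySem.Chars.find_eq_neg_one_iff]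
  intro hinf
  rw [← PySem.Chars.isIn_iff_infix, ← PySem.Chars.exists_prefix_drop_iff_isIn] at hinf
  obtain ⟨j, hj⟩ := hinf
  exact h (List.mem_of_getElem? ((singleton_prefix_drop c s j).mp hj))

theorem mysplit_modifyHead (l : List Char) : ∀ (pre : List Char),
    mysplit pre l = (mysplit [] l).modifyHead (pre ++ ·) := by
  induction l with
  | nil => intro pre; simp [mysplit]
  | cons c rest ih =>
    intro pre
    by_cases hc : c = ' '
    · simp [mysplit, hc]
    · simp only [mysplit, if_neg hc, List.nil_append]
      rw [ih (pre ++ [c]), ih [c]]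
      cases h : mysplit [] rest <;> simp

theorem mysplit_ne_nil (pre l : List Char) : mysplit pre l ≠ [] := by
  induction l generalizing pre with
  | nil => simp [mysplit]
  | cons c rest ih => by_cases hc : c = ' ' <;> simp [mysplit, hc, ih]

theorem mysplit_eq (cs : List Char) :
    mysplit [] cs =
      (let j := PySem.Chars.find cs [' ']
       if j = -1 then [cs] else cs.take j.toNat :: mysplit [] (cs.drop (j.toNat + 1))) := by
  induction cs with
  | nil =>
    rw [find_char_neg _ _ (by simp)]
    simp [mysplit]
  | cons c rest ih =>
    by_cases hc : c = ' '
    · subst hc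
      rw [find_char_eq (' ' :: rest) ' ' 0 (by simp) (by omega)]
      simp [mysplit]
    · simp only [mysplit, if_neg hc, List.nil_append]
      rw [mysplit_modifyHead rest [c], ih]
      by_cases hmem : ' ' ∈ rest
      · have hr : 0 ≤ PySem.Chars.find rest [' '] := by
          rw [PySem.Chars.find_nonneg_iff, ← PySem.Chars.isIn_iff_infix,
            ← PySem.Chars.exists_prefix_drop_iff_isIn]
          obtain ⟨i, hi, hgi⟩ := List.getElem_of_mem (by exact hmem)
          exact ⟨i, (singleton_prefix_drop _ _ _).mpr (by simp [List.getElem?_eq_getElem hi, hgi])⟩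
        set jr := (PySem.Chars.find rest [' ']).toNat with hjr
        have hne : PySem.Chars.find rest [' '] ≠ -1 := by omega
        have hrj : rest[jr]? = some ' ' := by
          obtain ⟨hp, _⟩ := PySem.Chars.find_spec hr
          exact (singleton_prefix_drop _ _ _).mp hp
        have hmin : ∀ i, i < jr → rest[i]? ≠ some ' ' := by
          intro i hi
          obtain ⟨_, hm⟩ := PySem.Chars.find_spec hr
          exact fun hh => hm i hi ((singleton_prefix_drop _ _ _).mpr hh)
        have hfind : PySem.Chars.find (c :: rest) [' '] = ((jr + 1 : Nat) : Int) := by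
          apply find_char_eq
          · simpa using hrj
          · intro i hi
            cases i with
            | zero => simp [hc]
            | succ m => simpa using hmin m (by omega)
        rw [if_neg hne, hfind]
        rw [if_neg (by omega), ← hjr]
        simp [List.modifyHead]
      · rw [find_char_neg rest ' ' hmem,
          find_char_neg (c :: rest) ' ' (by simp [hmem]; exact fun hh => hc hh.symm)]
        simp [List.modifyHead]

theorem find_getElem (cs : List Char) (h : 0 ≤ PySem.Chars.find cs [' ']) :
    cs[(PySem.Chars.find cs [' ']).toNat]? = some ' ' := by
  obtain ⟨hp, _⟩ := PySem.Chars.find_spec h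
  exact (singleton_prefix_drop _ _ _).mp hp

theorem A_F : ∀ (n : Nat) (cs : List Char),
    PySem.Chars.join [' '] ((mysplit [] cs).take (n + 1)) = F n cs := by
  intro n
  induction n with
  | zero =>
    intro cs
    rw [mysplit_eq cs]
    by_cases h : PySem.Chars.find cs [' '] = -1
    · simp [h, F, PySem.Chars.join_singleton]
    · simp only [h, if_false, List.take_succ_cons, List.take_zero]
      simp [F, h, PySem.Chars.join_singleton]
  | succ n ih =>
    intro cs
    rw [mysplit_eq cs]
    by_cases h : PySem.Chars.find cs [' '] = -1
    · simp [h, F, PySem.Chars.join_singleton]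
    · have hnn : 0 ≤ PySem.Chars.find cs [' '] := by
        have := PySem.Chars.neg_one_le_find cs [' ']; omega
      set jt := (PySem.Chars.find cs [' ']).toNat with hjt
      simp only [if_neg h, List.take_succ_cons]
      obtain ⟨q, qs, hq⟩ := List.exists_cons_of_ne_nil (mysplit_ne_nil [] (cs.drop (jt + 1)))
      have hjoin : PySem.Chars.join [' ']
          (cs.take jt :: ((mysplit [] (cs.drop (jt + 1))).take (n + 1))) =
          cs.take jt ++ [' '] ++ PySem.Chars.join [' '] ((mysplit [] (cs.drop (jt + 1))).take (n + 1)) := by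
        rw [hq, List.take_succ_cons, PySem.Chars.join_cons_cons]
      rw [hjoin, ih]
      have hget : cs[jt]? = some ' ' := find_getElem cs hnn
      conv_rhs => rw [F]
      simp only [if_neg h]
      have : cs.take (jt + 1) = cs.take jt ++ [' '] := by
        rw [List.take_add_one, hget]; rfl
      rw [← hjt, this]

theorem B_F : ∀ (n : Nat) (pre suf : List Char) (s : String), s.toList = pre ++ suf →
    bLoop s (n + 1) ((pre.length : Int) - 1) = String.ofList (pre ++ F n suf) := by
  intro n
  induction n with
  | zero =>
    intro pre suf s hs
    rw [bLoop]
    have harg : (pre.length : Int) - 1 + 1 = ((pre.length : Nat) : Int) := by omega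
    rw [harg, PySem.Str.findFrom_eq, hs]
    have hlen : pre.length ≤ (pre ++ suf).length := by simp
    rw [show (" ".toList) = [' '] from by decide]
    rw [PySem.Chars.findFrom_natCast _ _ _ hlen, List.drop_left]
    by_cases h : PySem.Chars.find suf [' '] = -1
    · rw [if_pos h, if_pos rfl]
      rw [F]
      rw [h, if_pos rfl, ← hs, String.ofList_toList]
    · have hnn : 0 ≤ PySem.Chars.find suf [' '] := by
        have := PySem.Chars.neg_one_le_find suf [' ']; omega
      rw [if_neg h, if_neg (by omega)]
      rw [bLoop]
      set jr := (PySem.Chars.find suf [' ']).toNat with hjr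
      have hcast : (pre.length : Int) + PySem.Chars.find suf [' '] = ((pre.length + jr : Nat) : Int) := by
        push_cast; omega
      rw [hcast, PySem.Str.slice]
      rw [PySem.Chars.slice_eq_listSlice, PySem.List.slice_to_natCast, hs]
      rw [List.take_append]
      have h1 : List.take (pre.length + jr) pre = pre := List.take_of_length_le (by omega)
      have h2 : pre.length + jr - pre.length = jr := by omega
      rw [h1, h2]
      congr 1
      rw [F]
      simp only [if_neg h, ← hjr]
  | succ n ih =>
    intro pre suf s hs
    rw [bLoop]
    have harg : (pre.length : Int) - 1 + 1 = ((pre.length : Nat) : Int) := by omega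
    rw [harg, PySem.Str.findFrom_eq, hs]
    have hlen : pre.length ≤ (pre ++ suf).length := by simp
    rw [show (" ".toList) = [' '] from by decide]
    rw [PySem.Chars.findFrom_natCast _ _ _ hlen, List.drop_left]
    by_cases h : PySem.Chars.find suf [' '] = -1
    · rw [if_pos h, if_pos rfl]
      rw [F]
      rw [h, if_pos rfl, ← hs, String.ofList_toList]
    · have hnn : 0 ≤ PySem.Chars.find suf [' '] := by
        have := PySem.Chars.neg_one_le_find suf [' ']; omega
      rw [if_neg h, if_neg (by omega)]
      set jr := (PySem.Chars.find suf [' ']).toNat with hjr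
      have hget : suf[jr]? = some ' ' := find_getElem suf hnn
      have hsuf : suf.take jr ++ ' ' :: suf.drop (jr + 1) = suf := by
        conv_rhs => rw [← List.take_append_drop (jr + 1) suf]
        rw [List.take_add_one, hget]
        simp
      have hcast : (pre.length : Int) + PySem.Chars.find suf [' '] =
          (((pre ++ suf.take jr ++ [' ']).length : Nat) : Int) - 1 := by
        have hjlt : jr < suf.length := by
          by_contra hge
          simp [List.getElem?_eq_none (by omega : suf.length ≤ jr)] at hget
        simp [List.length_take]
        omega
      rw [hcast, ih (pre ++ suf.take jr ++ [' ']) (suf.drop (jr + 1)) s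
        (by rw [hs]; simp [hsuf])]
      congr 1
      rw [F]
      simp only [if_neg h, ← hjr]
      have : suf.take (jr + 1) = suf.take jr ++ [' '] := by
        rw [List.take_add_one, hget]; rfl
      rw [this]
      simp

theorem aLoop_eq (k : Int) : ∀ (ws : List (List Char)) (i : Int) (res : List (List Char)),
    0 ≤ i → i ≤ k → aLoop k i res ws = res ++ ws.take (k - i).toNat := by
  intro ws
  induction ws with
  | nil => intro i res _ _; simp [aLoop]
  | cons w ws ih =>
    intro i res h0 hk
    rw [aLoop]
    by_cases hik : i = k
    · rw [if_pos hik]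
      simp [hik]
    · rw [if_neg hik]
      rw [ih (i + 1) (res ++ [w]) (by omega) (by omega)]
      have : (k - i).toNat = (k - (i + 1)).toNat + 1 := by omega
      rw [this, List.take_succ_cons]
      simp

-- ===== VERDICT (by name: the statement is the Claim_ definition above) =====
theorem truncateSentence_spec : Claim_equal_truncateSentence := by
  intro s k _ hk
  unfold Spec_truncateSentence
  unfold Pre_truncateSentence at hk
  rw [truncateSentence, truncateSentence_alt]
  rw [show (" ".toList) = [' '] from by decide]
  rw [splitOn_eq_mysplit]
  by_cases h0 : k = 0
  · rw [if_pos h0]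
    subst h0
    rcases hsp : mysplit [] s.toList with _ | ⟨q, qs⟩
    · exact (mysplit_ne_nil [] s.toList hsp).elim
    · rw [aLoop, if_pos rfl, PySem.Chars.join_nil]
  · rw [if_neg h0]
    rw [aLoop_eq k (mysplit [] s.toList) 0 [] le_rfl hk]
    simp only [List.nil_append, Int.sub_zero]
    obtain ⟨m, hm⟩ : ∃ m, k.toNat = m + 1 := ⟨k.toNat - 1, by omega⟩
    rw [hm, A_F m s.toList]
    have hb := B_F m [] s.toList s (by simp)
    norm_num at hb
    rw [hb]
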